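-- pv_equiv track=rewrite | github.com/davidfreina/acn22-labs | lab2/reproduce_9.py | calculate_plot_input
-- ===== SOURCE A (Python) =====
-- from operator import itemgetter
--
-- def calculate_plot_input(edges):
--     ret = [[0], [0]]
--     sortedDict = sorted(edges.items(), key=itemgetter(1))
--
--     lastRank = 0
--     lastVal = 0
--     for pair in sortedDict:
--         lastRank += 1
--         if pair[1] != lastVal:
--             ret[0].append(lastRank)
--             ret[1].append(lastVal)
--             lastVal = pair[1]
--     return ret
-- ===== SOURCE B (Python) =====
-- from collections import Counter
--
-- def calculate_plot_input(edges):
--     cnt = Counter(edges.values())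
--     ranks = [0]
--     vals = [0]
--     cum = 0
--     prev = 0
--     for v in sorted(cnt):
--         if v != prev:
--             ranks.append(cum + 1)
--             vals.append(prev)
--             prev = v
--         cum += cnt[v]
--     return [ranks, vals]
-- ===== Notes on version B (the rewrite author's own statement) =====
-- stated objective: alternative
-- what changed: Replaces sorting all (key,value) items and scanning element-by-element for value changes with a Counter over the values and a single loop over the distinct values in sorted order, maintaining a cumulative count instead of detecting group boundaries.
import Mathlib
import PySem

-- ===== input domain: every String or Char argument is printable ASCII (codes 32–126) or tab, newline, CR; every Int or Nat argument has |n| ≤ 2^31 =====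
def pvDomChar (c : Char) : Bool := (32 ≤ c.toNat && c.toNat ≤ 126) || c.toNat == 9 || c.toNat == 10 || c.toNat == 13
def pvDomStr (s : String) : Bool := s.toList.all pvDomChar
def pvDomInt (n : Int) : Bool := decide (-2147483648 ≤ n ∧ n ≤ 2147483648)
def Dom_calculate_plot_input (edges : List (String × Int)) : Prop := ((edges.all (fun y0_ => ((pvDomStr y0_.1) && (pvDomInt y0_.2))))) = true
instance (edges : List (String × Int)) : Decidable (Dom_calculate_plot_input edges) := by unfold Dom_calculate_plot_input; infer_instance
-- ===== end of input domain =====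

-- B replaces the sort-all-items-and-scan loop by a Counter over the values plus a loop
-- over the distinct values in sorted order (objective: alternative decomposition).


-- ===== PORT A =====
-- loop body of A: state (lastRank, lastVal, ret0, ret1)
def pvAstep (st : Int × Int × List Int × List Int) (pair : String × Int) :
    Int × Int × List Int × List Int :=
  let lastRank := st.1 + 1
  if pair.2 ≠ st.2.1 then
    (lastRank, pair.2, st.2.2.1 ++ [lastRank], st.2.2.2 ++ [st.2.1])
  else
    (lastRank, st.2.1, st.2.2.1, st.2.2.2)

def calculate_plot_input (edges : List (String × Int)) : List (List Int) :=
  let d := PySem.Dict.ofList edges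
  let sortedDict := PySem.List.sorted d.items (fun p => p.2) false
  let st := sortedDict.foldl pvAstep (0, 0, [0], [0])
  [st.2.2.1, st.2.2.2]

-- ===== PORT B =====
-- loop body of B: state (ranks, vals, cum, prev)
def pvBstep (cnt : PySem.Dict Int Int) (st : List Int × List Int × Int × Int) (v : Int) :
    List Int × List Int × Int × Int :=
  if v ≠ st.2.2.2 then
    (st.1 ++ [st.2.2.1 + 1], st.2.1 ++ [st.2.2.2], st.2.2.1 + cnt.getD v 0, v)
  else
    (st.1, st.2.1, st.2.2.1 + cnt.getD v 0, st.2.2.2)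

def calculate_plot_input_alt (edges : List (String × Int)) : List (List Int) :=
  let d := PySem.Dict.ofList edges
  let cnt := PySem.Dict.counter d.values
  let st := (PySem.List.sorted cnt.keys (fun v => v) false).foldl (pvBstep cnt) ([0], [0], 0, 0)
  [st.1, st.2.1]

-- ===== PRECONDITION & SPEC =====
def Spec_calculate_plot_input (edges : List (String × Int)) (out : List (List Int)) : Prop := out = calculate_plot_input_alt edges
instance (edges : List (String × Int)) (out : List (List Int)) : Decidable (Spec_calculate_plot_input edges out) := by unfold Spec_calculate_plot_input; infer_instance

-- ===== CLAIM (what is proved, stated in full; the proofs are below) =====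
def Claim_equal_calculate_plot_input : Prop := ∀ (edges : List (String × Int)), Dom_calculate_plot_input edges → Spec_calculate_plot_input edges (calculate_plot_input edges)

-- ===== LEMMAS AND PROOFS =====

-- A's loop body reads only the value component of the pair.
def pvAstepV (st : Int × Int × List Int × List Int) (v : Int) :
    Int × Int × List Int × List Int :=
  let lastRank := st.1 + 1
  if v ≠ st.2.1 then
    (lastRank, v, st.2.2.1 ++ [lastRank], st.2.2.2 ++ [st.2.1])
  else
    (lastRank, st.2.1, st.2.2.1, st.2.2.2)

theorem foldA_replicate_same (m : Nat) (v rank : Int) (r0 r1 : List Int) :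
    (List.replicate m v).foldl pvAstepV (rank, v, r0, r1) = (rank + m, v, r0, r1) := by
  induction m generalizing rank with
  | zero => simp
  | succ k ih =>
      rw [List.replicate_succ, List.foldl_cons]
      have : pvAstepV (rank, v, r0, r1) v = (rank + 1, v, r0, r1) := by
        simp [pvAstepV]
      rw [this, ih]
      congr 1
      omega

theorem foldA_replicate (c : Nat) (hc : 1 ≤ c) (v rank last : Int) (r0 r1 : List Int) :
    (List.replicate c v).foldl pvAstepV (rank, last, r0, r1) =
      if v ≠ last then (rank + c, v, r0 ++ [rank + 1], r1 ++ [last])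
      else (rank + c, v, r0, r1) := by
  obtain ⟨k, rfl⟩ : ∃ k, c = k + 1 := ⟨c - 1, by omega⟩
  rw [List.replicate_succ, List.foldl_cons]
  by_cases h : v = last
  · subst h
    have : pvAstepV (rank, v, r0, r1) v = (rank + 1, v, r0, r1) := by simp [pvAstepV]
    rw [this, foldA_replicate_same]
    simp
    omega
  · have : pvAstepV (rank, last, r0, r1) v = (rank + 1, v, r0 ++ [rank + 1], r1 ++ [last]) := by
      simp [pvAstepV, h]
    rw [this, foldA_replicate_same]
    simp [h]
    omega

-- counts: the flatMap-of-replicates over a list of distinct values with the right counts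
-- is a permutation of the original list
theorem count_flatMap_replicate (ds l : List Int) (hnd : ds.Nodup) (x : Int) :
    (ds.flatMap (fun v => List.replicate (l.count v) v)).count x
      = if x ∈ ds then l.count x else 0 := by
  induction ds with
  | nil => simp
  | cons v tl ih =>
      have hnd' : tl.Nodup := hnd.of_cons
      have hv : v ∉ tl := (List.nodup_cons.mp hnd).1
      rw [List.flatMap_cons, List.count_append, ih hnd']
      by_cases hx : x = v
      · subst hx
        simp [hv]
      · simp [List.count_replicate, Ne.symm hx, hx]

theorem perm_flatMap_replicate (ds l : List Int) (hnd : ds.Nodup)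
    (hmem : ∀ x, x ∈ ds ↔ x ∈ l) :
    (ds.flatMap (fun v => List.replicate (l.count v) v)).Perm l := by
  rw [List.perm_iff_count]
  intro x
  rw [count_flatMap_replicate ds l hnd x]
  by_cases hx : x ∈ ds
  · simp [hx]
  · have : x ∉ l := fun h => hx ((hmem x).mpr h)
    simp [hx, List.count_eq_zero_of_not_mem this]

theorem pairwise_flatMap_replicate (ds : List Int) (c : Int → Nat)
    (h : ds.Pairwise (· < ·)) :
    (ds.flatMap (fun v => List.replicate (c v) v)).Pairwise (· ≤ ·) := by
  induction ds with
  | nil => simp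
  | cons v tl ih =>
      rw [List.flatMap_cons, List.pairwise_append]
      refine ⟨?_, ih h.of_cons, ?_⟩
      · exact List.pairwise_replicate.mpr (Or.inr le_rfl)
      · intro a ha b hb
        rw [List.eq_of_mem_replicate ha]
        rw [List.mem_flatMap] at hb
        obtain ⟨w, hw, hbw⟩ := hb
        rw [List.eq_of_mem_replicate hbw]
        exact le_of_lt (List.rel_of_pairwise_cons h hw)

-- the sorted values of A's sorted item list are exactly the flatMap of replicates over
-- the strictly sorted distinct values
theorem sorted_values_eq (pairs : List (String × Int)) :
    ((PySem.List.sorted pairs (fun p => p.2) false).map (fun p => p.2))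
      = (PySem.List.sorted (PySem.Set.ofList (pairs.map (fun p => p.2))) (fun v => v) false).flatMap
          (fun v => List.replicate ((pairs.map (fun p => p.2)).count v) v) := by
  set l := pairs.map (fun p => p.2) with hl
  set ds := PySem.List.sorted (PySem.Set.ofList l) (fun v => v) false with hds
  have hlt : ds.Pairwise (· < ·) := PySem.List.sorted_ofList_pairwise_lt l
  have hnd : ds.Nodup := hlt.nodup
  have hmem : ∀ x, x ∈ ds ↔ x ∈ l := by
    intro x
    rw [hds, PySem.List.mem_sorted, PySem.Set.mem_ofList]
  have hperm1 : ((PySem.List.sorted pairs (fun p => p.2) false).map (fun p => p.2)).Perm l := by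
    exact (PySem.List.sorted_perm pairs (fun p => p.2) false).map _
  have hperm2 := perm_flatMap_replicate ds l hnd hmem
  have hs1 : ((PySem.List.sorted pairs (fun p => p.2) false).map (fun p => p.2)).Pairwise (· ≤ ·) :=
    PySem.List.sorted_map_key_pairwise pairs (fun p => p.2)
  have hs2 := pairwise_flatMap_replicate ds (fun v => l.count v) hlt
  exact List.Perm.eq_of_pairwise (fun a b _ _ h1 h2 => le_antisymm h1 h2) hs1 hs2 (hperm1.trans hperm2.symm)

-- main loop correspondence: A's element-by-element fold over the flattened groups equals
-- B's per-group fold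
theorem fold_correspond (ds l : List Int) (hmem : ∀ v ∈ ds, v ∈ l)
    (rank last : Int) (r0 r1 : List Int) :
    (ds.flatMap (fun v => List.replicate (l.count v) v)).foldl pvAstepV (rank, last, r0, r1)
      = (let b := ds.foldl (pvBstep (PySem.Dict.counter l)) (r0, r1, rank, last)
         (b.2.2.1, b.2.2.2, b.1, b.2.1)) := by
  induction ds generalizing rank last r0 r1 with
  | nil => simp
  | cons v tl ih =>
      have hv : v ∈ l := hmem v (List.mem_cons_self)
      have hc : 1 ≤ l.count v := List.count_pos_iff.mpr hv
      rw [List.flatMap_cons, List.foldl_append, List.foldl_cons,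
          foldA_replicate (l.count v) hc v rank last r0 r1]
      have hcnt : (PySem.Dict.counter l).getD v 0 = (l.count v : Int) :=
        PySem.Dict.getD_counter l v
      by_cases h : v = last
      · subst h
        simp only [ne_eq, not_true_eq_false, if_false]
        rw [ih (fun w hw => hmem w (List.mem_cons_of_mem _ hw))]
        have : pvBstep (PySem.Dict.counter l) (r0, r1, rank, v) v
            = (r0, r1, rank + (l.count v : Int), v) := by
          simp [pvBstep, hcnt]
        rw [this]
      · simp only [ne_eq, h, not_false_eq_true, if_true]
        rw [ih (fun w hw => hmem w (List.mem_cons_of_mem _ hw))]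
        have : pvBstep (PySem.Dict.counter l) (r0, r1, rank, last) v
            = (r0 ++ [rank + 1], r1 ++ [last], rank + (l.count v : Int), v) := by
          simp [pvBstep, h, hcnt]
        rw [this]

-- ===== VERDICT (by name: the statement is the Claim_ definition above) =====
theorem calculate_plot_input_spec : Claim_equal_calculate_plot_input := by
  intro edges _
  unfold Spec_calculate_plot_input calculate_plot_input calculate_plot_input_alt
  dsimp only
  have hstep : ∀ (xs : List (String × Int)) (st : Int × Int × List Int × List Int),
      xs.foldl pvAstep st = (xs.map (fun p => p.2)).foldl pvAstepV st := by
    intro xs st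
    rw [List.foldl_map]
    rfl
  rw [hstep]
  rw [sorted_values_eq (PySem.Dict.ofList edges).items]
  rw [show (PySem.Dict.ofList edges).values = (PySem.Dict.ofList edges).items.map (fun p => p.2) from rfl]
  rw [PySem.Dict.keys_counter]
  rw [fold_correspond _ ((PySem.Dict.ofList edges).items.map (fun p => p.2))
        (by intro v hv; rw [PySem.List.mem_sorted, PySem.Set.mem_ofList] at hv; exact hv) 0 0 [0] [0]]
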